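-- pv_equiv track=rewrite | github.com/tandem-project/TANDEM-project | TANDEM System Manager/Service Chains Manager/Workflow Editor/src/utils/construct_parameters.py | construct_dependencies
-- ===== SOURCE A (Python) =====
-- def construct_dependencies(deps, runtime_setup_components, rc_dependencies, current_r_c):
--     """
--     Return a list of tuples denoting:
--     (runtime_comp_name, dependency)
--
--     To construct the dependencies, we take into account:
--     1. The dependencies defined within each `set_up` components
--     2. The dependencies defined by the user on the `run_time` components
--
--     The resulting dependencies are the set_up components that the current component
--     should depend on, that also correspond to a run_time component, on which the initial
--     run_time_component depends on.
--
--     ## Parameters: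
--
--     * dep: Dependencies of the current set_up component
--     * runtime_setup_components: all the run_time_setup_components
--
--     """
--     res = []
--     _deps = [[dep, False] for dep in deps]
--     # for every dependency
--     for i, (dep, visited) in enumerate(_deps):
--         # for every runtime component
--         for r_c, s_c in runtime_setup_components.items():
--             if r_c in rc_dependencies:
--                 for c in s_c["comp"]:
--                     if dep == c['comp_id'] and not visited:
--                         res.append(f'{r_c}-{dep}')
--                         _deps[i][1] = True
--
--
--
--     for dep, visited in _deps:
--         if not visited:
--             res.append(f'{current_r_c}-{dep}')
--
--
--     return res
-- ===== SOURCE B (Python) =====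
-- def construct_dependencies(deps, runtime_setup_components, rc_dependencies, current_r_c):
--     # Build an index comp_id -> list of owning runtime-component names (all
--     # occurrences, in dict/comp order), then resolve each dep by one lookup.
--     owners = {}
--     for r_c, s_c in runtime_setup_components.items():
--         if r_c in rc_dependencies:
--             for c in s_c["comp"]:
--                 owners.setdefault(c['comp_id'], []).append(r_c)
--     matched = []
--     fallback = []
--     for dep in deps:
--         rcs = owners.get(dep)
--         if rcs:
--             matched += [f'{r_c}-{dep}' for r_c in rcs]
--         else:
--             fallback.append(f'{current_r_c}-{dep}')
--     return matched + fallback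
-- ===== Notes on version B (the rewrite author's own statement) =====
-- stated objective: faster
-- what changed: B builds a comp_id -> owning-runtime-component-names index in one pass over the filtered runtime components (setdefault/append, duplicates and order preserved), then resolves every dependency by a single dict lookup, collecting matched and fallback entries in two accumulators instead of A's per-dependency rescan of all runtime components with visited flags.
-- outside the precondition, e.g. on construct_dependencies([], {'r': {}}, ['r'], 'x'): A returns [], B raises KeyError
import Mathlib
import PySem

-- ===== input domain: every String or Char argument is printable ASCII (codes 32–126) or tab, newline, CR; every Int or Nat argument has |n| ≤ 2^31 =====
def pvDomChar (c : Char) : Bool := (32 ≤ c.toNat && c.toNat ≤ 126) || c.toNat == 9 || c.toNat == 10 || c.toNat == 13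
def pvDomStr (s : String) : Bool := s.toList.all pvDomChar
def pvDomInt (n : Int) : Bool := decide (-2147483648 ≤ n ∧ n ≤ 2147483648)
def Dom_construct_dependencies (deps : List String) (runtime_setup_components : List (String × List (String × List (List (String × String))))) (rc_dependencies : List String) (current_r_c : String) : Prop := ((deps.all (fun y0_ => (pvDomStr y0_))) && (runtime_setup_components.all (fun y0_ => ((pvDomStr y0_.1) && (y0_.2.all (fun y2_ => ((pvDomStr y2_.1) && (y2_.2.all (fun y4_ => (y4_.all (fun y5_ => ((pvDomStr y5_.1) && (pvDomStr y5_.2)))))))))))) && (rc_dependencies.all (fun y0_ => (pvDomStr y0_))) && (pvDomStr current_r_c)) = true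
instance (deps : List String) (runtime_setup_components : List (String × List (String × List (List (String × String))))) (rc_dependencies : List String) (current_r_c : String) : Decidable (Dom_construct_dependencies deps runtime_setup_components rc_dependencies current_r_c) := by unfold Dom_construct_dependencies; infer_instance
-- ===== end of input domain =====

-- B replaces A's per-dependency rescan of all runtime components by a comp_id → owners
-- index built once, then a single lookup pass over deps (objective: faster).

-- ===== PORT A =====
-- literal port of A: _deps with visited flags, nested loops appending to res and
-- setting _deps[i][1] = True; the 'visited' read in the loop body is the value
-- destructured by enumerate (always the initial False, as in Python, since entry i
-- is only mutated during its own iteration, after the destructuring read).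
def construct_dependencies (deps : List String) (runtime_setup_components : List (String × List (String × List (List (String × String))))) (rc_dependencies : List String) (current_r_c : String) : List String :=
  let _deps : List (String × Bool) := deps.map (fun dep => (dep, false))
  let st :=
    (PySem.List.enumerate _deps 0).foldl
      (fun (st : List String × List (String × Bool)) ip =>
        runtime_setup_components.foldl
          (fun (st1 : List String × List (String × Bool)) p =>
            if rc_dependencies.contains p.1 then
              match (PySem.Dict.mk p.2).get? "comp" with
              | some comps =>
                  comps.foldl
                    (fun (st2 : List String × List (String × Bool)) c =>
                      match (PySem.Dict.mk c).get? "comp_id" with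
                      | some cid =>
                          if ip.2.1 == cid && !ip.2.2 then
                            (st2.1 ++ [p.1 ++ "-" ++ ip.2.1], PySem.List.pySetD st2.2 ip.1 (ip.2.1, true))
                          else st2
                      | none => st2)  -- KeyError 'comp_id' in Python: excluded by Pre_
                    st1
              | none => st1  -- KeyError 'comp' in Python: excluded by Pre_
            else st1)
          st)
      (([] : List String), _deps)
  st.2.foldl (fun res dv => if !dv.2 then res ++ [current_r_c ++ "-" ++ dv.1] else res) st.1

-- ===== PORT B =====
-- literal port of Source B: build owners index (setdefault(...).append = Dict.modify),
-- then one pass over deps collecting matched and fallback lists.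
def construct_dependencies_alt (deps : List String) (runtime_setup_components : List (String × List (String × List (List (String × String))))) (rc_dependencies : List String) (current_r_c : String) : List String :=
  let owners : PySem.Dict String (List String) :=
    runtime_setup_components.foldl
      (fun d p =>
        if rc_dependencies.contains p.1 then
          match (PySem.Dict.mk p.2).get? "comp" with
          | some comps =>
              comps.foldl
                (fun d c =>
                  match (PySem.Dict.mk c).get? "comp_id" with
                  | some cid => d.modify cid [] (fun l => l ++ [p.1])
                  | none => d)  -- KeyError 'comp_id': excluded by Pre_
                d
          | none => d  -- KeyError 'comp': excluded by Pre_
        else d)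
      PySem.Dict.empty
  let mf :=
    deps.foldl
      (fun (mf : List String × List String) dep =>
        match owners.get? dep with
        | some rcs =>
            if rcs == [] then (mf.1, mf.2 ++ [current_r_c ++ "-" ++ dep])
            else (mf.1 ++ rcs.map (fun r_c => r_c ++ "-" ++ dep), mf.2)
        | none => (mf.1, mf.2 ++ [current_r_c ++ "-" ++ dep]))
      (([] : List String), ([] : List String))
  mf.1 ++ mf.2

-- ===== PRECONDITION & SPEC =====
-- Every runtime component listed in rc_dependencies must carry a "comp" entry whose
-- comps all carry a "comp_id" entry — otherwise Python raises KeyError. A skips all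
-- lookups when deps is empty while B builds its index first, so malformed components
-- are excluded even for empty deps (there A returns [] but B raises).
def Pre_construct_dependencies (deps : List String) (runtime_setup_components : List (String × List (String × List (List (String × String))))) (rc_dependencies : List String) (current_r_c : String) : Prop :=
  (runtime_setup_components.all (fun p =>
    !rc_dependencies.contains p.1 ||
      (match (PySem.Dict.mk p.2).get? "comp" with
       | some comps => comps.all (fun c => ((PySem.Dict.mk c).get? "comp_id").isSome)
       | none => false))) = true
instance (deps : List String) (runtime_setup_components : List (String × List (String × List (List (String × String))))) (rc_dependencies : List String) (current_r_c : String) : Decidable (Pre_construct_dependencies deps runtime_setup_components rc_dependencies current_r_c) := by unfold Pre_construct_dependencies; infer_instance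

def pvWitness_construct_dependencies : List String × (List (String × List (String × List (List (String × String))))) × List String × String :=
  (["d", "e"], [("r", [("comp", [[("comp_id", "d")]])])], ["r"], "m")

def Spec_construct_dependencies (deps : List String) (runtime_setup_components : List (String × List (String × List (List (String × String))))) (rc_dependencies : List String) (current_r_c : String) (out : List String) : Prop := out = construct_dependencies_alt deps runtime_setup_components rc_dependencies current_r_c
instance (deps : List String) (runtime_setup_components : List (String × List (String × List (List (String × String))))) (rc_dependencies : List String) (current_r_c : String) (out : List String) : Decidable (Spec_construct_dependencies deps runtime_setup_components rc_dependencies current_r_c out) := by unfold Spec_construct_dependencies; infer_instance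

-- ===== CLAIM (what is proved, stated in full; the proofs are below) =====
def Claim_equal_construct_dependencies : Prop := ∀ (deps : List String) (runtime_setup_components : List (String × List (String × List (List (String × String))))) (rc_dependencies : List String) (current_r_c : String), Dom_construct_dependencies deps runtime_setup_components rc_dependencies current_r_c → Pre_construct_dependencies deps runtime_setup_components rc_dependencies current_r_c → Spec_construct_dependencies deps runtime_setup_components rc_dependencies current_r_c (construct_dependencies deps runtime_setup_components rc_dependencies current_r_c)

-- ===== LEMMAS AND PROOFS =====

-- (cid, owner-name) pairs produced, in order, by the filtered nested scan
def pvPairs (runtime_setup_components : List (String × List (String × List (List (String × String))))) (rc_dependencies : List String) : List (String × String) :=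
  runtime_setup_components.flatMap (fun p =>
    if rc_dependencies.contains p.1 then
      match (PySem.Dict.mk p.2).get? "comp" with
      | some comps => comps.filterMap (fun c => ((PySem.Dict.mk c).get? "comp_id").map (fun cid => (cid, p.1)))
      | none => []
    else [])

-- the list of owners of a dependency, in order, with multiplicity
def pvOwn (runtime_setup_components : List (String × List (String × List (List (String × String))))) (rc_dependencies : List String) (dep : String) : List String :=
  ((pvPairs runtime_setup_components rc_dependencies).filter (fun q => q.1 == dep)).map (fun q => q.2)

-- the formatted match strings contributed by one dependency
def pvRow (R : List (String × List (String × List (List (String × String))))) (RD : List String) (dep : String) : List String :=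
  (pvOwn R RD dep).map (fun r => r ++ "-" ++ dep)

-- the visited flag a dependency ends up with in A
def pvFlag (R : List (String × List (String × List (List (String × String))))) (RD : List String) (dep : String) : Bool :=
  if pvOwn R RD dep = [] then false else true

theorem pvPairs_cons (p : String × List (String × List (List (String × String)))) (R : List (String × List (String × List (List (String × String))))) (RD : List String) :
    pvPairs (p :: R) RD
    = (if RD.contains p.1 then
         match (PySem.Dict.mk p.2).get? "comp" with
         | some comps => comps.filterMap (fun c => ((PySem.Dict.mk c).get? "comp_id").map (fun cid => (cid, p.1)))
         | none => []
       else []) ++ pvPairs R RD := by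
  simp [pvPairs]

-- A's innermost loop for one dependency, flattened to a fold over the produced pairs
theorem pvA_comps (comps : List (List (String × String))) (rc dep : String) (i : Int)
    (st : List String × List (String × Bool)) :
    comps.foldl
      (fun (st2 : List String × List (String × Bool)) c =>
        match (PySem.Dict.mk c).get? "comp_id" with
        | some cid =>
            if dep == cid && !false then
              (st2.1 ++ [rc ++ "-" ++ dep], PySem.List.pySetD st2.2 i (dep, true))
            else st2
        | none => st2) st
    = (comps.filterMap (fun c => ((PySem.Dict.mk c).get? "comp_id").map (fun cid => (cid, rc)))).foldl
        (fun (st2 : List String × List (String × Bool)) q =>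
          if dep == q.1 && !false then
            (st2.1 ++ [q.2 ++ "-" ++ dep], PySem.List.pySetD st2.2 i (dep, true))
          else st2) st := by
  induction comps generalizing st with
  | nil => rfl
  | cons c cs ih =>
      cases h : (PySem.Dict.mk c).get? "comp_id" <;>
        simp only [List.foldl_cons, List.filterMap_cons, h, Option.map_some, Option.map_none] <;>
        exact ih _

-- A's two inner loops, flattened to a fold over pvPairs
theorem pvA_flat (R : List (String × List (String × List (List (String × String))))) (RD : List String)
    (dep : String) (i : Int) :
    ∀ (st : List String × List (String × Bool)),
    R.foldl
      (fun (st1 : List String × List (String × Bool)) p =>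
        if RD.contains p.1 then
          match (PySem.Dict.mk p.2).get? "comp" with
          | some comps =>
              comps.foldl
                (fun (st2 : List String × List (String × Bool)) c =>
                  match (PySem.Dict.mk c).get? "comp_id" with
                  | some cid =>
                      if dep == cid && !false then
                        (st2.1 ++ [p.1 ++ "-" ++ dep], PySem.List.pySetD st2.2 i (dep, true))
                      else st2
                  | none => st2) st1
          | none => st1
        else st1) st
    = (pvPairs R RD).foldl
        (fun (st2 : List String × List (String × Bool)) q =>
          if dep == q.1 && !false then
            (st2.1 ++ [q.2 ++ "-" ++ dep], PySem.List.pySetD st2.2 i (dep, true))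
          else st2) st := by
  induction R with
  | nil => intro st; rfl
  | cons p R ih =>
      intro st
      rw [List.foldl_cons, pvPairs_cons, List.foldl_append, ih]
      congr 1
      by_cases hc : RD.contains p.1 = true
      · simp only [hc, if_true]
        cases h : (PySem.Dict.mk p.2).get? "comp"
        · simp
        · simpa using pvA_comps _ _ dep i st
      · have hm : p.1 ∉ RD := by simpa using hc
        simp [hm]

-- a fold of A's per-pair body over any pair list, evaluated in closed form
theorem pvPairs_fold (dep : String) (n : Nat) :
    ∀ (L : List (String × String)) (res : List String) (ds : List (String × Bool)),
    L.foldl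
      (fun (st2 : List String × List (String × Bool)) q =>
        if dep == q.1 && !false then
          (st2.1 ++ [q.2 ++ "-" ++ dep], PySem.List.pySetD st2.2 (n : Int) (dep, true))
        else st2) (res, ds)
    = (res ++ ((L.filter (fun q => q.1 == dep)).map (fun q => q.2)).map (fun r => r ++ "-" ++ dep),
       if L.filter (fun q => q.1 == dep) = [] then ds else ds.set n (dep, true)) := by
  intro L
  induction L with
  | nil => intro res ds; simp
  | cons q L ih =>
      intro res ds
      rw [List.foldl_cons]
      cases hq : (dep == q.1) with
      | true =>
          have h2 : (q.1 == dep) = true := by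
            have := eq_of_beq hq; simp [this]
          rw [if_pos (by simp [hq])]
          rw [PySem.List.pySetD_natCast, ih]
          simp only [List.filter_cons, h2, if_true, List.map_cons]
          refine Prod.ext ?_ ?_
          · have := eq_of_beq hq
            simp [this]
          · simp only [List.cons_ne_self]
            split <;> simp [List.set_set]
      | false =>
          have h2 : (q.1 == dep) = false := by
            have : ¬ dep = q.1 := by simpa using hq
            simp [Ne.symm this]
          rw [if_neg (by simp [hq])]
          rw [ih]
          have h3 : List.filter (fun q => q.1 == dep) (q :: L) = List.filter (fun q => q.1 == dep) L := by
            rw [List.filter_cons]; simp [h2]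
          rw [h3]

-- A's outer loop over enumerate, evaluated
theorem pvA_outer (R : List (String × List (String × List (List (String × String))))) (RD : List String)
    (pending : List String) :
    ∀ (dn : List (String × Bool)) (res : List String),
    (PySem.List.enumerate (pending.map (fun d => (d, false))) (dn.length : Int)).foldl
      (fun (st : List String × List (String × Bool)) ip =>
        R.foldl
          (fun (st1 : List String × List (String × Bool)) p =>
            if RD.contains p.1 then
              match (PySem.Dict.mk p.2).get? "comp" with
              | some comps =>
                  comps.foldl
                    (fun (st2 : List String × List (String × Bool)) c =>
                      match (PySem.Dict.mk c).get? "comp_id" with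
                      | some cid =>
                          if ip.2.1 == cid && !ip.2.2 then
                            (st2.1 ++ [p.1 ++ "-" ++ ip.2.1], PySem.List.pySetD st2.2 ip.1 (ip.2.1, true))
                          else st2
                      | none => st2) st1
              | none => st1
            else st1) st)
      (res, dn ++ pending.map (fun d => (d, false)))
    = (res ++ pending.flatMap (pvRow R RD),
       dn ++ pending.map (fun dep => (dep, pvFlag R RD dep))) := by
  induction pending with
  | nil => intro dn res; simp [PySem.List.enumerate_nil]
  | cons dep rest ih =>
      intro dn res
      simp only [List.map_cons, PySem.List.enumerate_cons, List.foldl_cons]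
      rw [pvA_flat R RD dep ((dn.length : Nat) : Int), pvPairs_fold dep dn.length]
      have hset : (dn ++ (dep, false) :: rest.map (fun d => (d, false))).set dn.length (dep, true)
          = dn ++ (dep, true) :: rest.map (fun d => (d, false)) := by simp
      have hcast : ((dn.length : Int) + 1) = (((dn ++ [(dep, pvFlag R RD dep)]).length : Nat) : Int) := by
        simp
      by_cases he : pvOwn R RD dep = []
      · have hf : (pvPairs R RD).filter (fun q => q.1 == dep) = [] := by
          simpa [pvOwn, List.map_eq_nil_iff] using he
        rw [if_pos hf]
        have hrow : ((((pvPairs R RD).filter (fun q => q.1 == dep)).map (fun q => q.2)).map (fun r => r ++ "-" ++ dep)) = pvRow R RD dep := by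
          simp [pvRow, pvOwn]
        rw [hrow, hcast]
        have hdone : dn ++ (dep, false) :: rest.map (fun d => (d, false))
            = (dn ++ [(dep, pvFlag R RD dep)]) ++ rest.map (fun d => (d, false)) := by
          simp [pvFlag, he]
        rw [hdone, ih]
        simp [pvFlag, he, List.flatMap_cons]
      · have hf : ¬ ((pvPairs R RD).filter (fun q => q.1 == dep) = []) := by
          simpa [pvOwn, List.map_eq_nil_iff] using he
        rw [if_neg hf, hset]
        have hrow : ((((pvPairs R RD).filter (fun q => q.1 == dep)).map (fun q => q.2)).map (fun r => r ++ "-" ++ dep)) = pvRow R RD dep := by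
          simp [pvRow, pvOwn]
        rw [hrow, hcast]
        have hdone : dn ++ (dep, true) :: rest.map (fun d => (d, false))
            = (dn ++ [(dep, pvFlag R RD dep)]) ++ rest.map (fun d => (d, false)) := by
          simp [pvFlag, he]
        rw [hdone, ih]
        simp [pvFlag, he, List.flatMap_cons]

-- A's final loop over the flagged dependencies
theorem pvA_final (R : List (String × List (String × List (List (String × String))))) (RD : List String)
    (cur : String) (l : List String) :
    ∀ (res : List String),
    (l.map (fun dep => (dep, pvFlag R RD dep))).foldl
      (fun res dv => if !dv.2 then res ++ [cur ++ "-" ++ dv.1] else res) res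
    = res ++ (l.filter (fun dep => !pvFlag R RD dep)).map (fun dep => cur ++ "-" ++ dep) := by
  induction l with
  | nil => intro res; simp
  | cons dep rest ih =>
      intro res
      simp only [List.map_cons, List.foldl_cons, List.filter_cons]
      cases hf : pvFlag R RD dep <;> simp only [hf, Bool.not_true, Bool.not_false] <;> rw [ih] <;> simp

-- A computes: all match rows in dep order, then the fallbacks of unmatched deps
theorem pvA_eq (deps : List String) (R : List (String × List (String × List (List (String × String))))) (RD : List String) (cur : String) :
    construct_dependencies deps R RD cur
    = deps.flatMap (pvRow R RD) ++ (deps.filter (fun dep => !pvFlag R RD dep)).map (fun dep => cur ++ "-" ++ dep) := by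
  have h := pvA_outer R RD deps [] []
  simp only [List.length_nil, Nat.cast_zero, List.nil_append] at h
  dsimp only [construct_dependencies]
  rw [h]
  dsimp only
  rw [pvA_final R RD cur deps]

-- ===== B-side lemmas =====

theorem pvB_comps (comps : List (List (String × String))) (rc : String)
    (d : PySem.Dict String (List String)) :
    comps.foldl
      (fun (d : PySem.Dict String (List String)) c =>
        match (PySem.Dict.mk c).get? "comp_id" with
        | some cid => d.modify cid [] (fun l => l ++ [rc])
        | none => d) d
    = (comps.filterMap (fun c => ((PySem.Dict.mk c).get? "comp_id").map (fun cid => (cid, rc)))).foldl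
        (fun (d : PySem.Dict String (List String)) q => d.modify q.1 [] (fun l => l ++ [q.2])) d := by
  induction comps generalizing d with
  | nil => rfl
  | cons c cs ih =>
      cases h : (PySem.Dict.mk c).get? "comp_id" <;>
        simp only [List.foldl_cons, List.filterMap_cons, h, Option.map_some, Option.map_none] <;>
        exact ih _

theorem pvB_flat (R : List (String × List (String × List (List (String × String))))) (RD : List String) :
    ∀ (d : PySem.Dict String (List String)),
    R.foldl
      (fun (d : PySem.Dict String (List String)) p =>
        if RD.contains p.1 then
          match (PySem.Dict.mk p.2).get? "comp" with
          | some comps =>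
              comps.foldl
                (fun (d : PySem.Dict String (List String)) c =>
                  match (PySem.Dict.mk c).get? "comp_id" with
                  | some cid => d.modify cid [] (fun l => l ++ [p.1])
                  | none => d) d
          | none => d
        else d) d
    = (pvPairs R RD).foldl
        (fun (d : PySem.Dict String (List String)) q => d.modify q.1 [] (fun l => l ++ [q.2])) d := by
  induction R with
  | nil => intro d; rfl
  | cons p R ih =>
      intro d
      rw [List.foldl_cons, pvPairs_cons, List.foldl_append, ih]
      congr 1
      by_cases hc : RD.contains p.1 = true
      · simp only [hc, if_true]
        cases h : (PySem.Dict.mk p.2).get? "comp" with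
        | none => simp
        | some comps => simpa using pvB_comps comps p.1 d
      · have hm : p.1 ∉ RD := by simpa using hc
        simp [hm]

-- the owners index looks up exactly pvOwn
theorem pvB_get? (R : List (String × List (String × List (List (String × String))))) (RD : List String) (dep : String) :
    ((pvPairs R RD).foldl
        (fun (d : PySem.Dict String (List String)) q => d.modify q.1 [] (fun l => l ++ [q.2]))
        PySem.Dict.empty).get? dep
    = (if pvOwn R RD dep = [] then none else some (pvOwn R RD dep)) := by
  have hgetD : ((pvPairs R RD).foldl
      (fun (d : PySem.Dict String (List String)) q => d.modify q.1 [] (fun l => l ++ [q.2]))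
      PySem.Dict.empty).getD dep []
      = pvOwn R RD dep := by
    rw [PySem.Dict.getD_foldl_modify_append]
    simp [pvOwn]
  have hkeys : ((pvPairs R RD).foldl
      (fun (d : PySem.Dict String (List String)) q => d.modify q.1 [] (fun l => l ++ [q.2]))
      PySem.Dict.empty).keys = PySem.Set.ofList ((pvPairs R RD).map (fun q => q.1)) := by
    rw [PySem.Dict.keys_foldl_modify_key (pvPairs R RD) (fun q => q.1) [] (fun _ q => (fun l => l ++ [q.2])) PySem.Dict.empty]
    simp [PySem.Set.update_nil_left]
  have hmem : dep ∈ ((pvPairs R RD).map (fun q => q.1)) ↔ ¬ (pvOwn R RD dep = []) := by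
    simp [pvOwn, List.map_eq_nil_iff, List.filter_eq_nil_iff, List.mem_map]
  by_cases he : pvOwn R RD dep = []
  · rw [if_pos he]
    rw [PySem.Dict.get?_eq_none_iff_not_mem_keys, hkeys, PySem.Set.mem_ofList]
    rw [hmem]
    simp [he]
  · rw [if_neg he]
    cases hg : ((pvPairs R RD).foldl
        (fun (d : PySem.Dict String (List String)) q => d.modify q.1 [] (fun l => l ++ [q.2]))
        PySem.Dict.empty).get? dep with
    | none =>
        exfalso
        rw [PySem.Dict.get?_eq_none_iff_not_mem_keys, hkeys, PySem.Set.mem_ofList, hmem] at hg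
        exact hg he
    | some v =>
        rw [PySem.Dict.getD_eq_get?_getD, hg] at hgetD
        simp only [Option.getD_some] at hgetD
        rw [hgetD]

-- B's second loop, evaluated
theorem pvB_loop (R : List (String × List (String × List (List (String × String))))) (RD : List String)
    (cur : String) (ow : PySem.Dict String (List String))
    (how : ∀ dep, ow.get? dep = (if pvOwn R RD dep = [] then none else some (pvOwn R RD dep)))
    (l : List String) :
    ∀ (m f : List String),
    l.foldl
      (fun (mf : List String × List String) dep =>
        match ow.get? dep with
        | some rcs =>
            if rcs == [] then (mf.1, mf.2 ++ [cur ++ "-" ++ dep])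
            else (mf.1 ++ rcs.map (fun r_c => r_c ++ "-" ++ dep), mf.2)
        | none => (mf.1, mf.2 ++ [cur ++ "-" ++ dep])) (m, f)
    = (m ++ l.flatMap (pvRow R RD),
       f ++ (l.filter (fun dep => !pvFlag R RD dep)).map (fun dep => cur ++ "-" ++ dep)) := by
  induction l with
  | nil => intro m f; simp
  | cons dep rest ih =>
      intro m f
      rw [List.foldl_cons]
      by_cases he : pvOwn R RD dep = []
      · rw [show (ow.get? dep) = none by rw [how]; simp [he]]
        dsimp only
        rw [ih]
        simp [pvRow, pvFlag, he, List.flatMap_cons]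
      · rw [show (ow.get? dep) = some (pvOwn R RD dep) by rw [how]; simp [he]]
        dsimp only
        rw [if_neg (by simpa using he)]
        rw [ih]
        simp [pvRow, pvFlag, he, List.flatMap_cons]

-- B computes the same closed form
theorem pvB_eq (deps : List String) (R : List (String × List (String × List (List (String × String))))) (RD : List String) (cur : String) :
    construct_dependencies_alt deps R RD cur
    = deps.flatMap (pvRow R RD) ++ (deps.filter (fun dep => !pvFlag R RD dep)).map (fun dep => cur ++ "-" ++ dep) := by
  dsimp only [construct_dependencies_alt]
  rw [pvB_flat R RD PySem.Dict.empty]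
  rw [pvB_loop R RD cur _ (pvB_get? R RD) deps [] []]
  simp

theorem construct_dependencies_spec : Claim_equal_construct_dependencies := by
  intro deps R RD cur _ _
  unfold Spec_construct_dependencies
  rw [pvA_eq, pvB_eq]
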